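-- pv_equiv track=rewrite | github.com/eclemmon/politics_1 | Rhythm_Generators/euclidean_rhythm_generator.py | euclidian_splitter
-- ===== SOURCE A (Python) =====
-- def euclidian_splitter(euclidian_rhythm_1d_list):
--     """
--     Takes in a euclidean rhythm list and splits it into a list of lists organized by onsets grouped with
--     trailing pulses.
--     :param euclidian_rhythm_1d_list: list e.g. [1,0,0,1,0,1,0]
--     :return: list of lists, e.g., [[1, 0, 0], [1, 0], [1, 0], [1, 0, 0], [1, 0], [1, 0]]
--     """
--     # This can be done better....
--     res = []
--     sub_array = []
--     while len(euclidian_rhythm_1d_list) > 0: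
--         val = euclidian_rhythm_1d_list.pop(0)
--         if val == 1:
--             res.append(sub_array)
--             sub_array = [1]
--         else:
--             sub_array.append(val)
--     res.append(sub_array)
--     return res[1:]
-- ===== SOURCE B (Python) =====
-- def euclidian_splitter(euclidian_rhythm_1d_list):
--     res = []
--     cur = []
--     for v in reversed(euclidian_rhythm_1d_list):
--         cur.append(v)
--         if v == 1:
--             res.append(cur[::-1])
--             cur = []
--     res.reverse()
--     return res
-- ===== Notes on version B (the rewrite author's own statement) =====
-- stated objective: faster
-- what changed: B scans the list backwards once, collecting each group in a buffer and emitting it (reversed) when its leading onset is reached, then reverses the group list, instead of A's destructive pop(0) loop that carries a forward buffer and trims res[1:].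
import Mathlib
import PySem

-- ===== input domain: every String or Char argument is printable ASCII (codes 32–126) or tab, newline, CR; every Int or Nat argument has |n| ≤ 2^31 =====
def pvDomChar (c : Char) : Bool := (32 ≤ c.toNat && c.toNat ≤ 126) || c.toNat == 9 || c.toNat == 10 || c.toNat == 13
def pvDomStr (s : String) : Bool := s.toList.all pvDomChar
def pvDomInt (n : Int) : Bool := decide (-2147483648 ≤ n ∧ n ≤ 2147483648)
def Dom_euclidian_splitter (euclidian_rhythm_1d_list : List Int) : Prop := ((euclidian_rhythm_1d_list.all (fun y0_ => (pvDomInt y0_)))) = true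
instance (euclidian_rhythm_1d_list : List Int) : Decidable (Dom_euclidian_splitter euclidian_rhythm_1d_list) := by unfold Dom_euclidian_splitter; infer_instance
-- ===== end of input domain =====

-- B scans the list backwards once, emitting each group at its leading onset (O(n)), instead of
-- A's destructive pop(0) loop (O(n^2)).  A empties its argument list in place; B does not mutate
-- it — the equivalence proved here is about the return value only.

-- ===== PORT A =====
-- the while-loop: pop(0) the head, branch on val, carrying res and sub_array
def pvLoopA (xs : List Int) (res : List (List Int)) (sub : List Int) : List (List Int) :=
  match xs with
  | [] => res ++ [sub]                 -- loop ends; res.append(sub_array)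
  | v :: t =>
      if v = 1 then pvLoopA t (res ++ [sub]) [1]
      else pvLoopA t res (sub ++ [v])

def euclidian_splitter (euclidian_rhythm_1d_list : List Int) : List (List Int) :=
  -- return res[1:]  (slice from 1 on a list = drop 1)
  (pvLoopA euclidian_rhythm_1d_list [] []).drop 1

-- ===== PORT B =====
-- for v in reversed(lst): cur.append(v); if v == 1: res.append(cur[::-1]); cur = []
-- then res.reverse(); return res   — state (res, cur) threaded through a fold over the reversed list
def pvStepB (st : List (List Int) × List Int) (v : Int) : List (List Int) × List Int :=
  let cur := st.2 ++ [v]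
  if v = 1 then (st.1 ++ [cur.reverse], []) else (st.1, cur)

def euclidian_splitter_alt (euclidian_rhythm_1d_list : List Int) : List (List Int) :=
  (euclidian_rhythm_1d_list.reverse.foldl pvStepB ([], [])).1.reverse

-- ===== PRECONDITION & SPEC =====
def Spec_euclidian_splitter (euclidian_rhythm_1d_list : List Int) (out : List (List Int)) : Prop := out = euclidian_splitter_alt euclidian_rhythm_1d_list
instance (euclidian_rhythm_1d_list : List Int) (out : List (List Int)) : Decidable (Spec_euclidian_splitter euclidian_rhythm_1d_list out) := by unfold Spec_euclidian_splitter; infer_instance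

-- ===== CLAIM (what is proved, stated in full; the proofs are below) =====
def Claim_equal_euclidian_splitter : Prop := ∀ (euclidian_rhythm_1d_list : List Int), Dom_euclidian_splitter euclidian_rhythm_1d_list → Spec_euclidian_splitter euclidian_rhythm_1d_list (euclidian_splitter euclidian_rhythm_1d_list)

-- ===== LEMMAS AND PROOFS =====

-- the pulses up to (excluding) the first onset
def pvTakeU : List Int → List Int
  | [] => []
  | v :: t => if v = 1 then [] else v :: pvTakeU t

-- the onset-led groups (reference shape both ports are reduced to)
def pvGrps : List Int → List (List Int)
  | [] => []
  | v :: t => if v = 1 then (1 :: pvTakeU t) :: pvGrps t else pvGrps t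

theorem pvLoopA_eq (xs : List Int) : ∀ (res : List (List Int)) (sub : List Int),
    pvLoopA xs res sub = res ++ ((sub ++ pvTakeU xs) :: pvGrps xs) := by
  induction xs with
  | nil => intro res sub; simp [pvLoopA, pvTakeU, pvGrps]
  | cons v t ih =>
      intro res sub
      by_cases h : v = 1 <;> simp [pvLoopA, pvTakeU, pvGrps, h, ih]

theorem pvTakeU_no_onset (ws : List Int) (h : ∀ c ∈ ws, c ≠ 1) : pvTakeU ws = ws := by
  induction ws with
  | nil => rfl
  | cons w t ih =>
      have hw : w ≠ 1 := h w (by simp)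
      simp [pvTakeU, hw, ih (fun c hc => h c (by simp [hc]))]

theorem pvGrps_no_onset (ws : List Int) (h : ∀ c ∈ ws, c ≠ 1) : pvGrps ws = [] := by
  induction ws with
  | nil => rfl
  | cons w t ih =>
      have hw : w ≠ 1 := h w (by simp)
      simp [pvGrps, hw, ih (fun c hc => h c (by simp [hc]))]

theorem pvTakeU_append_one (zs ws : List Int) : pvTakeU (zs ++ 1 :: ws) = pvTakeU zs := by
  induction zs with
  | nil => simp [pvTakeU]
  | cons z t ih => by_cases h : z = 1 <;> simp [pvTakeU, h, ih]

theorem pvGrps_append_one (zs ws : List Int) (h : ∀ c ∈ ws, c ≠ 1) :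
    pvGrps (zs ++ 1 :: ws) = pvGrps zs ++ [1 :: ws] := by
  induction zs with
  | nil => simp [pvGrps, pvTakeU_no_onset ws h, pvGrps_no_onset ws h]
  | cons z t ih =>
      by_cases hz : z = 1 <;> simp [pvGrps, hz, ih, pvTakeU_append_one]

theorem pvFoldB_eq (ys : List Int) : ∀ (res : List (List Int)) (cur : List Int),
    (∀ c ∈ cur, c ≠ 1) →
    (ys.foldl pvStepB (res, cur)).1 = res ++ (pvGrps (ys.reverse ++ cur.reverse)).reverse := by
  induction ys with
  | nil =>
      intro res cur hc
      have h' : ∀ c ∈ cur.reverse, c ≠ 1 := fun c hcmem => hc c (List.mem_reverse.mp hcmem)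
      simp [pvGrps_no_onset cur.reverse h']
  | cons v t ih =>
      intro res cur hc
      by_cases hv : v = 1
      · subst hv
        rw [List.foldl_cons]
        have hstep : pvStepB (res, cur) 1 = (res ++ [(cur ++ [1]).reverse], []) := by
          simp [pvStepB]
        have h0 : ∀ c ∈ ([] : List Int), c ≠ 1 := by simp
        rw [hstep]
        have key := ih (res ++ [(cur ++ [1]).reverse]) [] h0
        rw [key]
        have h' : ∀ c ∈ cur.reverse, c ≠ 1 := fun c hcmem => hc c (List.mem_reverse.mp hcmem)
        rw [show ((1 : Int) :: t).reverse ++ cur.reverse = t.reverse ++ 1 :: cur.reverse by simp]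
        rw [pvGrps_append_one t.reverse cur.reverse h']
        simp
      · rw [List.foldl_cons]
        have hstep : pvStepB (res, cur) v = (res, cur ++ [v]) := by
          simp [pvStepB, hv]
        have h1 : ∀ c ∈ cur ++ [v], c ≠ 1 := by
          intro c hcmem
          rcases List.mem_append.mp hcmem with h1 | h2
          · exact hc c h1
          · simp at h2; simpa [h2] using hv
        rw [hstep, ih res (cur ++ [v]) h1]
        simp

-- ===== VERDICT (by name: the statement is the Claim_ definition above) =====
theorem euclidian_splitter_spec : Claim_equal_euclidian_splitter := by
  intro xs _
  unfold Spec_euclidian_splitter euclidian_splitter euclidian_splitter_alt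
  rw [pvLoopA_eq, pvFoldB_eq xs.reverse [] [] (by simp)]
  simp
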